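-- pv_equiv track=rewrite | github.com/Ag3497120/verantyx-v6 | arc/world_commands.py | interior_only
-- ===== SOURCE A (Python) =====
-- from collections import Counter, defaultdict
--
-- def _bg(g):
--     c = Counter()
--     for row in g: c.update(row)
--     return c.most_common(1)[0][0]
--
-- def interior_only(g):
--     bg=_bg(g); h,w=len(g),len(g[0]); res=[[bg]*w for _ in range(h)]
--     for r in range(h):
--         for c in range(w):
--             if g[r][c]!=bg:
--                 border=False
--                 for dr,dc in [(-1,0),(1,0),(0,-1),(0,1)]:
--                     nr,nc=r+dr,c+dc
--                     if not(0<=nr<h and 0<=nc<w) or g[nr][nc]==bg: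
--                         border=True; break
--                 if not border: res[r][c]=g[r][c]
--     return res
-- ===== SOURCE B (Python) =====
-- from collections import Counter
--
-- def _bg(g):
--     c = Counter()
--     for row in g: c.update(row)
--     return c.most_common(1)[0][0]
--
-- def _forbidden(g, bg, h, w):
--     # scatter: border positions, plus each background cell and its 4 neighbors
--     forb = {(r, c) for r in range(h) for c in (0, w - 1)}
--     forb |= {(r, c) for c in range(w) for r in (0, h - 1)}
--     for r in range(h):
--         for c in range(w):
--             if g[r][c] == bg:
--                 forb.update(((r, c), (r - 1, c), (r + 1, c), (r, c - 1), (r, c + 1)))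
--     return forb
--
-- def interior_only(g):
--     bg = _bg(g)
--     h, w = len(g), len(g[0])
--     forb = _forbidden(g, bg, h, w)
--     return [[g[r][c] if g[r][c] != bg and (r, c) not in forb else bg
--              for c in range(w)] for r in range(h)]
-- ===== Notes on version B (the rewrite author's own statement) =====
-- stated objective: alternative
-- what changed: Replaces the per-cell gather (for each non-background cell test its 4 neighbors with break) by a scatter/dilation pass: one pass builds a set of forbidden positions (all border positions plus every background cell and its 4 orthogonal neighbors), and a second pass keeps a cell iff it is non-background and not forbidden.
import Mathlib
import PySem

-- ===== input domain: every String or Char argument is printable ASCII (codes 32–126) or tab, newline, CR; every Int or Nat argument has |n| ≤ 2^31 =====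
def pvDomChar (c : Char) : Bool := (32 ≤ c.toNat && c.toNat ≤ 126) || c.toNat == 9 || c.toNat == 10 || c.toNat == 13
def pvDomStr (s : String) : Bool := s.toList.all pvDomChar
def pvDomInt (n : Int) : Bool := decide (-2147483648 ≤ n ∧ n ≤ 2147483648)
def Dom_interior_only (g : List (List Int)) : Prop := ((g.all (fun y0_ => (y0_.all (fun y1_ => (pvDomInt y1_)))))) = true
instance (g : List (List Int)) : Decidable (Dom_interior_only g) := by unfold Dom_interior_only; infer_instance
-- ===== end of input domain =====

-- B keeps A's gather of each cell's neighbors replaced by a scatter (dilation) pass building one forbidden-position set; same O(h*w) cost, return value proved identical.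

-- ===== PORT A =====
-- shared helper: _bg(g) — Counter over all rows, then most_common(1)[0][0] = first key
-- (in insertion order) with maximal count; the [] case is Python's IndexError (excluded by Pre_).
def pvBg (g : List (List Int)) : Int :=
  let cnt := g.foldl (fun d row => row.foldl (fun d x => PySem.Dict.modify d x 0 (· + 1)) d) PySem.Dict.empty
  match PySem.Dict.items cnt with
  | [] => 0
  | kv :: rest => (rest.foldl (fun (best : Int × Int) p => if p.2 > best.2 then p else best) kv).1

-- shared accessor for g[r][c]: exact whenever 0 ≤ r < len(g) and 0 ≤ c < len(g[r]) — every
-- use in either port is guarded by those bounds (or lies inside Pre_), so the default is never the value of a raising access.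
def pvCell (g : List (List Int)) (r c : Int) : Int :=
  (PySem.List.pyGet? ((PySem.List.pyGet? g r).getD []) c).getD 0

def interior_only (g : List (List Int)) : List (List Int) :=
  let bg := pvBg g
  let h : Int := g.length
  let w : Int := ((PySem.List.pyGet? g 0).getD []).length
  (PySem.List.pyRange 0 h 1).map (fun r =>
    (PySem.List.pyRange 0 w 1).map (fun c =>
      if pvCell g r c ≠ bg then
        if [((-1:Int),(0:Int)),(1,0),(0,-1),(0,1)].any (fun d =>
            decide (¬ (0 ≤ r + d.1 ∧ r + d.1 < h ∧ 0 ≤ c + d.2 ∧ c + d.2 < w)) ||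
            decide (pvCell g (r + d.1) (c + d.2) = bg))
        then bg else pvCell g r c
      else bg))

-- ===== PORT B =====
def pvNbrs (p : Int × Int) : List (Int × Int) :=
  [(p.1, p.2), (p.1 - 1, p.2), (p.1 + 1, p.2), (p.1, p.2 - 1), (p.1, p.2 + 1)]

-- port of _forbidden(g, bg, h, w)
def pvForbidden (g : List (List Int)) (bg h w : Int) : PySem.Set (Int × Int) :=
  let f0 := PySem.Set.union
      (PySem.Set.ofList ((PySem.List.pyRange 0 h 1).flatMap (fun r => [(r, (0 : Int)), (r, w - 1)])))
      ((PySem.List.pyRange 0 w 1).flatMap (fun c => [((0 : Int), c), (h - 1, c)]))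
  (PySem.List.pyRange 0 h 1).foldl (fun s r =>
    (PySem.List.pyRange 0 w 1).foldl (fun s c =>
      if pvCell g r c = bg then PySem.Set.update s (pvNbrs (r, c)) else s) s) f0

def interior_only_alt (g : List (List Int)) : List (List Int) :=
  let bg := pvBg g
  let h : Int := g.length
  let w : Int := ((PySem.List.pyGet? g 0).getD []).length
  let forb := pvForbidden g bg h w
  (PySem.List.pyRange 0 h 1).map (fun r =>
    (PySem.List.pyRange 0 w 1).map (fun c =>
      if pvCell g r c ≠ bg ∧ (r, c) ∉ forb then pvCell g r c else bg))

-- ===== PRECONDITION & SPEC =====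
-- Pre_ excludes exactly the inputs on which A raises: the empty grid and all-elements-empty
-- grids (IndexError in _bg / on g[0]) and grids with a row shorter than the first row (IndexError on g[r][c]).
def Pre_interior_only (g : List (List Int)) : Prop :=
  g ≠ [] ∧ (∀ row ∈ g, (g.headD []).length ≤ row.length) ∧ (∃ row ∈ g, row ≠ [])
instance (g : List (List Int)) : Decidable (Pre_interior_only g) := by unfold Pre_interior_only; infer_instance

def pvWitness_interior_only : List (List Int) := [[1, 1, 1], [1, 2, 1], [1, 1, 1]]

def Spec_interior_only (g : List (List Int)) (out : List (List Int)) : Prop := out = interior_only_alt g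
instance (g : List (List Int)) (out : List (List Int)) : Decidable (Spec_interior_only g out) := by unfold Spec_interior_only; infer_instance

-- ===== CLAIM (what is proved, stated in full; the proofs are below) =====
def Claim_equal_interior_only : Prop := ∀ (g : List (List Int)), Dom_interior_only g → Pre_interior_only g → Spec_interior_only g (interior_only g)

-- ===== LEMMAS AND PROOFS =====

-- membership in a foldl over a set-valued step whose one-step membership is known
lemma pv_mem_foldl {α β : Type} [BEq β] [LawfulBEq β] (Q : α → β → Prop)
    (F : PySem.Set β → α → PySem.Set β)
    (hF : ∀ s a x, x ∈ F s a ↔ x ∈ s ∨ Q a x) :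
    ∀ (l : List α) (s : PySem.Set β) (x : β),
      x ∈ l.foldl F s ↔ x ∈ s ∨ ∃ a ∈ l, Q a x := by
  intro l
  induction l with
  | nil => intro s x; simp
  | cons a t ih =>
    intro s x
    simp only [List.foldl_cons, ih, hF, List.mem_cons]
    constructor
    · rintro ((h | h) | ⟨b, hb, hq⟩)
      · exact Or.inl h
      · exact Or.inr ⟨a, Or.inl rfl, h⟩
      · exact Or.inr ⟨b, Or.inr hb, hq⟩
    · rintro (h | ⟨b, (rfl | hb), hq⟩)
      · exact Or.inl (Or.inl h)
      · exact Or.inl (Or.inr hq)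
      · exact Or.inr ⟨b, hb, hq⟩

lemma pv_mem_forbidden (g : List (List Int)) (bg h w : Int) (x : Int × Int) :
    x ∈ pvForbidden g bg h w ↔
      (∃ r, (0 ≤ r ∧ r < h) ∧ (x = (r, 0) ∨ x = (r, w - 1))) ∨
      (∃ c, (0 ≤ c ∧ c < w) ∧ (x = (0, c) ∨ x = (h - 1, c))) ∨
      (∃ r c, (0 ≤ r ∧ r < h) ∧ (0 ≤ c ∧ c < w) ∧ pvCell g r c = bg ∧ x ∈ pvNbrs (r, c)) := by
  unfold pvForbidden
  rw [pv_mem_foldl (Q := fun r x => ∃ c ∈ PySem.List.pyRange 0 w 1, pvCell g r c = bg ∧ x ∈ pvNbrs (r, c))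
        _ (by
          intro s r x
          rw [pv_mem_foldl (Q := fun c x => pvCell g r c = bg ∧ x ∈ pvNbrs (r, c))
                _ (by
                  intro s c x
                  by_cases hb : pvCell g r c = bg <;>
                    simp [hb, PySem.Set.mem_update]) ]) ]
  simp only [PySem.Set.mem_union, PySem.Set.mem_ofList, List.mem_flatMap,
    PySem.List.mem_pyRange_one, List.mem_cons]
  constructor
  · rintro ((⟨r, hr, hx⟩ | ⟨c, hc, hx⟩) | ⟨r, hr, c, hc, hb, hn⟩)
    · exact Or.inl ⟨r, hr, by tauto⟩
    · exact Or.inr (Or.inl ⟨c, hc, by tauto⟩)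
    · exact Or.inr (Or.inr ⟨r, c, hr, hc, hb, hn⟩)
  · rintro (⟨r, hr, hx⟩ | ⟨c, hc, hx⟩ | ⟨r, c, hr, hc, hb, hn⟩)
    · exact Or.inl (Or.inl ⟨r, hr, by tauto⟩)
    · exact Or.inl (Or.inr ⟨c, hc, by tauto⟩)
    · exact Or.inr ⟨r, hr, c, hc, hb, hn⟩

-- per-cell: A's "some neighbor is out of bounds or background" test ≡ membership in B's forbidden set
lemma pv_cell_iff (g : List (List Int)) (bg h w r c : Int)
    (hr : 0 ≤ r ∧ r < h) (hc : 0 ≤ c ∧ c < w) (hne : pvCell g r c ≠ bg) :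
    ([((-1 : Int), (0 : Int)), (1, 0), (0, -1), (0, 1)].any (fun d =>
        decide (¬ (0 ≤ r + d.1 ∧ r + d.1 < h ∧ 0 ≤ c + d.2 ∧ c + d.2 < w)) ||
        decide (pvCell g (r + d.1) (c + d.2) = bg)) = true)
      ↔ (r, c) ∈ pvForbidden g bg h w := by
  rw [pv_mem_forbidden]
  simp only [List.any_cons, List.any_nil, Bool.or_eq_true, decide_eq_true_eq, Bool.or_false,
    add_zero]
  constructor
  · rintro ((hoob | hbg) | (hoob | hbg) | (hoob | hbg) | hoob | hbg)
    · exact Or.inr (Or.inl ⟨c, hc, Or.inl (by rw [show r = 0 from by omega])⟩)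
    · by_cases h0 : 0 ≤ r + -1
      · exact Or.inr (Or.inr ⟨r + -1, c, ⟨h0, by omega⟩, hc, hbg,
          by simp [pvNbrs, Prod.ext_iff]⟩)
      · exact Or.inr (Or.inl ⟨c, hc, Or.inl (by rw [show r = 0 from by omega])⟩)
    · exact Or.inr (Or.inl ⟨c, hc, Or.inr (by rw [show r = h - 1 from by omega])⟩)
    · by_cases h0 : r + 1 < h
      · exact Or.inr (Or.inr ⟨r + 1, c, ⟨by omega, h0⟩, hc, hbg,
          by simp [pvNbrs, Prod.ext_iff]⟩)
      · exact Or.inr (Or.inl ⟨c, hc, Or.inr (by rw [show r = h - 1 from by omega])⟩)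
    · exact Or.inl ⟨r, hr, Or.inl (by rw [show c = 0 from by omega])⟩
    · by_cases h0 : 0 ≤ c + -1
      · exact Or.inr (Or.inr ⟨r, c + -1, hr, ⟨h0, by omega⟩, hbg,
          by simp [pvNbrs, Prod.ext_iff]⟩)
      · exact Or.inl ⟨r, hr, Or.inl (by rw [show c = 0 from by omega])⟩
    · exact Or.inl ⟨r, hr, Or.inr (by rw [show c = w - 1 from by omega])⟩
    · by_cases h0 : c + 1 < w
      · exact Or.inr (Or.inr ⟨r, c + 1, hr, ⟨by omega, h0⟩, hbg,
          by simp [pvNbrs, Prod.ext_iff]⟩)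
      · exact Or.inl ⟨r, hr, Or.inr (by rw [show c = w - 1 from by omega])⟩
  · rintro (⟨r', hr', hx | hx⟩ | ⟨c', hc', hx | hx⟩ | ⟨r', c', hr', hc', hb, hn⟩) <;>
      try simp only [Prod.ext_iff] at hx
    · exact Or.inr (Or.inr (Or.inl (Or.inl (by omega))))
    · exact Or.inr (Or.inr (Or.inr (Or.inl (by omega))))
    · exact Or.inl (Or.inl (by omega))
    · exact Or.inr (Or.inl (Or.inl (by omega)))
    · simp only [pvNbrs, List.mem_cons, List.not_mem_nil, or_false, Prod.ext_iff] at hn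
      rcases hn with ⟨h1, h2⟩ | ⟨h1, h2⟩ | ⟨h1, h2⟩ | ⟨h1, h2⟩ | ⟨h1, h2⟩
      · rw [← h1, ← h2] at hb; exact absurd hb hne
      · exact Or.inr (Or.inl (Or.inr (by rw [show r + 1 = r' from by omega, h2]; exact hb)))
      · exact Or.inl (Or.inr (by rw [show r + -1 = r' from by omega, h2]; exact hb))
      · exact Or.inr (Or.inr (Or.inr (Or.inr (by rw [show c + 1 = c' from by omega, h1]; exact hb))))
      · exact Or.inr (Or.inr (Or.inl (Or.inr (by rw [show c + -1 = c' from by omega, h1]; exact hb))))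

theorem pv_ports_agree (g : List (List Int)) : interior_only g = interior_only_alt g := by
  unfold interior_only interior_only_alt
  apply List.map_congr_left
  intro r hr
  apply List.map_congr_left
  intro c hc
  rw [PySem.List.mem_pyRange_one] at hr hc
  by_cases hne : pvCell g r c = pvBg g
  · simp [hne]
  · simp only [ne_eq, hne, not_false_eq_true, if_true, true_and]
    by_cases hb : (r, c) ∈ pvForbidden g (pvBg g) (g.length : Int) (((PySem.List.pyGet? g 0).getD []).length : Int)
    · rw [if_pos ((pv_cell_iff g _ _ _ r c hr hc hne).mpr hb), if_neg (by simp [hb])]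
    · rw [if_neg (by rw [pv_cell_iff g _ _ _ r c hr hc hne]; exact hb), if_pos hb]

-- ===== VERDICT (by name: the statement is the Claim_ definition above) =====
theorem interior_only_spec : Claim_equal_interior_only := by
  intro g _ _
  unfold Spec_interior_only
  exact pv_ports_agree g
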